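-- pv_equiv track=rewrite | github.com/freddiecorleone/crossword_navigation | src/ssp_modeling/simulation/grid_generator.py | _col_ok
-- ===== SOURCE A (Python) =====
-- from typing import Dict, List, Optional, Tuple, Set, Any, Union
--
-- def _col_ok(g: List[List[int]], c: int, Lmin: int) -> bool:
--     """Check that column c has no white run of length 1..Lmin-1."""
--     run = 0
--     for r in range(len(g)):
--         if g[r][c] == 0:
--             run += 1
--         else:
--             if 0 < run < Lmin:
--                 return False
--             run = 0
--     if 0 < run < Lmin:
--         return False
--     return True
-- ===== SOURCE B (Python) =====
-- from typing import List
--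
--
-- def _col_ok(g: List[List[int]], c: int, Lmin: int) -> bool:
--     """Check that column c has no white run of length 1..Lmin-1."""
--     col = [row[c] for row in g]
--     n = len(col)
--     starts = [r for r in range(n) if col[r] == 0 and (r == 0 or col[r - 1] != 0)]
--     return all(
--         r + k < n and col[r + k] == 0
--         for r in starts
--         for k in range(Lmin)
--     )
-- ===== Notes on version B (the rewrite author's own statement) =====
-- stated objective: alternative
-- what changed: B keeps no running counter at all: it materializes the column, lists the run-start positions (a zero whose predecessor is nonzero or absent), and checks at each start a lookahead window of Lmin consecutive in-range zeros, instead of A's single pass with a run accumulator and a duplicated post-loop boundary check.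
-- outside the precondition, e.g. on _col_ok([[0], [1], []], 0, 2): A returns False, B raises IndexError
import Mathlib
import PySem

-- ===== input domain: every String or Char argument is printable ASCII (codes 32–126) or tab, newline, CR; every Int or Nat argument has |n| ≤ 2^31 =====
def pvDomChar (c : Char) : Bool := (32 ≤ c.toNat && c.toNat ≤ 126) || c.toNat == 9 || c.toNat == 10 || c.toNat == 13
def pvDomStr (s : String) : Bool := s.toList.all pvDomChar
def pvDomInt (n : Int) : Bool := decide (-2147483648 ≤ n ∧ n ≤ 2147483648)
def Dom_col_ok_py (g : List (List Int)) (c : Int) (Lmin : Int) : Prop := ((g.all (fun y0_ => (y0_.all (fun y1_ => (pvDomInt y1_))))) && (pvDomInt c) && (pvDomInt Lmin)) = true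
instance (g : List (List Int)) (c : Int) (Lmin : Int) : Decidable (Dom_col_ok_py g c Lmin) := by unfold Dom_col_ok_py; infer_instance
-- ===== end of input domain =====

-- B drops A's running counter entirely: it finds each zero-run START position and checks a
-- Lmin-cell lookahead window of zeros there (O(n·Lmin) instead of O(n); objective: alternative).

-- ===== PORT A =====
-- A's for-loop over r in range(len(g)) with the running counter `run`;
-- g[r][c] is PySem.List.pyGet? (none = IndexError, unreachable under Pre_).
def colOkLoopA (rows : List (List Int)) (c : Int) (Lmin : Int) (run : Nat) : Bool :=
  match rows with
  | [] => !(0 < run ∧ (run : Int) < Lmin)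
  | row :: rest =>
    match PySem.List.pyGet? row c with
    | none => true   -- Python raises IndexError here; excluded by Pre_
    | some v =>
      if v = 0 then colOkLoopA rest c Lmin (run + 1)
      else if 0 < run ∧ (run : Int) < Lmin then false
      else colOkLoopA rest c Lmin 0

def col_ok_py (g : List (List Int)) (c : Int) (Lmin : Int) : Bool :=
  colOkLoopA g c Lmin 0

-- ===== PORT B =====
-- col = [row[c] for row in g]: a row where indexing raises IndexError is outside Pre_;
-- starts = run-start positions; range(Lmin) is List.range Lmin.toNat (empty for Lmin ≤ 0, as in
-- Python); col.getD _ 1 is col[i] at guarded in-range indices (the default 1 is never read there).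
-- Python's inner generator `(r+k<n and col[r+k]==0 for k in range(Lmin))`, consumed by all()
-- left to right with short-circuit: stop (False) at the first failing k.
def winFrom (col : List Int) (n : Nat) (i : Nat) : Nat → Bool
  | 0 => true
  | L + 1 => if i < n ∧ col.getD i 1 = 0 then winFrom col n (i + 1) L else false

def col_ok_py_alt (g : List (List Int)) (c : Int) (Lmin : Int) : Bool :=
  let col := g.filterMap (fun row => PySem.List.pyGet? row c)
  let n := col.length
  let starts := (List.range n).filter
    (fun r => (col.getD r 1 == 0) && (r == 0 || !(col.getD (r - 1) 1 == 0)))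
  starts.all (fun r => winFrom col n r Lmin.toNat)

-- ===== PRECONDITION & SPEC =====
-- Pre_ excludes inputs where some row lacks a valid index c: there B's eager comprehension
-- raises IndexError while A may already have returned False before reaching that row
-- (and otherwise A raises IndexError too).
def Pre_col_ok_py (g : List (List Int)) (c : Int) (Lmin : Int) : Prop :=
  ∀ row ∈ g, -(row.length : Int) ≤ c ∧ c < (row.length : Int)
instance (g : List (List Int)) (c : Int) (Lmin : Int) : Decidable (Pre_col_ok_py g c Lmin) := by
  unfold Pre_col_ok_py; infer_instance

def pvWitness_col_ok_py : List (List Int) × Int × Int := ([[0, 1], [1, 0], [0, 0]], 1, 2)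

def Spec_col_ok_py (g : List (List Int)) (c : Int) (Lmin : Int) (out : Bool) : Prop := out = col_ok_py_alt g c Lmin
instance (g : List (List Int)) (c : Int) (Lmin : Int) (out : Bool) : Decidable (Spec_col_ok_py g c Lmin out) := by unfold Spec_col_ok_py; infer_instance

-- ===== CLAIM (what is proved, stated in full; the proofs are below) =====
def Claim_equal_col_ok_py : Prop := ∀ (g : List (List Int)) (c : Int) (Lmin : Int), Dom_col_ok_py g c Lmin → Pre_col_ok_py g c Lmin → Spec_col_ok_py g c Lmin (col_ok_py g c Lmin)

-- ===== LEMMAS AND PROOFS =====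

-- pure version of A's loop, on the materialized column
def aCheck (col : List Int) (Lmin : Int) (run : Nat) : Bool :=
  match col with
  | [] => !(0 < run ∧ (run : Int) < Lmin)
  | v :: rest =>
    if v = 0 then aCheck rest Lmin (run + 1)
    else if 0 < run ∧ (run : Int) < Lmin then false
    else aCheck rest Lmin 0

-- positional predicate behind B: every zero-run start has a full window of Lmin zeros
def isStart (col : List Int) (r : Nat) : Prop :=
  col.getD r 1 = 0 ∧ (r = 0 ∨ col.getD (r - 1) 1 ≠ 0)

def W (col : List Int) (Lmin : Int) : Prop :=
  ∀ r, r < col.length → isStart col r →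
    ∀ k, k < Lmin.toNat → r + k < col.length ∧ col.getD (r + k) 1 = 0

theorem ltL (m : Nat) (Lmin : Int) : (m : Int) < Lmin ↔ m < Lmin.toNat := by omega

theorem getD_rep (m : Nat) (ys : List Int) (i : Nat) :
    (List.replicate m (0 : Int) ++ ys).getD i 1 = if i < m then 0 else ys.getD (i - m) 1 := by
  rcases lt_or_ge i m with h | h
  · rw [if_pos h, List.getD, List.getElem?_append_left (by simpa using h)]
    simp [h]
  · rw [if_neg (by omega), List.getD, List.getElem?_append_right (by simpa using h), List.getD]
    simp

theorem W_rep_nil (m : Nat) (Lmin : Int) :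
    W (List.replicate m (0 : Int)) Lmin ↔ ¬(0 < m ∧ (m : Int) < Lmin) := by
  have hget : ∀ i, (List.replicate m (0 : Int)).getD i 1 = if i < m then 0 else 1 := by
    intro i
    have h := getD_rep m [] i
    simpa using h
  have hlen : (List.replicate m (0 : Int)).length = m := by simp
  constructor
  · rintro hW ⟨hm, hL⟩
    have hs : isStart (List.replicate m (0 : Int)) 0 := by
      refine ⟨?_, Or.inl rfl⟩
      rw [hget, if_pos hm]
    have h := hW 0 (by omega) hs m ((ltL m Lmin).mp hL)
    rw [hlen] at h
    omega
  · intro h r hr hs k hk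
    rw [hlen] at hr
    have hr0 : r = 0 := by
      by_contra h0
      have hprev := hs.2.resolve_left h0
      apply hprev
      rw [hget, if_pos (by omega)]
    subst hr0
    have hLm : Lmin.toNat ≤ m := by
      by_contra h2
      exact h ⟨by omega, (ltL m Lmin).mpr (by omega)⟩
    refine ⟨by rw [hlen]; omega, by rw [hget, if_pos (by omega)]⟩

theorem W_rep_cons (m : Nat) (v : Int) (xs : List Int) (Lmin : Int) (hv : v ≠ 0) :
    W (List.replicate m (0 : Int) ++ v :: xs) Lmin ↔
      (¬(0 < m ∧ (m : Int) < Lmin) ∧ W xs Lmin) := by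
  have hlen : (List.replicate m (0 : Int) ++ v :: xs).length = m + 1 + xs.length := by
    simp; omega
  have hget : ∀ i, (List.replicate m (0 : Int) ++ v :: xs).getD i 1 =
      if i < m then 0 else if i = m then v else xs.getD (i - m - 1) 1 := by
    intro i
    rw [getD_rep]
    rcases lt_or_ge i m with h | h
    · simp [h]
    · rw [if_neg (by omega)]
      rcases Nat.eq_or_lt_of_le h with h1 | h1
      · simp [← h1, List.getD]
      · rw [if_neg (by omega), if_neg (by omega)]
        have e : i - m = (i - m - 1) + 1 := by omega
        rw [e, List.getD_cons_succ]
        congr 1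
  constructor
  · intro hW
    constructor
    · rintro ⟨hm, hL⟩
      have hstart : isStart (List.replicate m (0 : Int) ++ v :: xs) 0 := by
        refine ⟨?_, Or.inl rfl⟩
        rw [hget, if_pos hm]
      have h := hW 0 (by rw [hlen]; omega) hstart m ((ltL m Lmin).mp hL)
      obtain ⟨h1, h2⟩ := h
      rw [hget, if_neg (by omega), if_pos (by omega)] at h2
      exact hv h2
    · intro p hp hs k hk
      have hstart : isStart (List.replicate m (0 : Int) ++ v :: xs) (m + 1 + p) := by
        refine ⟨?_, Or.inr ?_⟩
        · rw [hget, if_neg (by omega), if_neg (by omega)]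
          have e : m + 1 + p - m - 1 = p := by omega
          rw [e]; exact hs.1
        · rw [hget]
          rcases Nat.eq_zero_or_pos p with h0 | h0
          · rw [if_neg (by omega), if_pos (by omega)]
            exact hv
          · rw [if_neg (by omega), if_neg (by omega)]
            have e : m + 1 + p - 1 - m - 1 = p - 1 := by omega
            rw [e]
            rcases hs.2 with h1 | h1
            · omega
            · exact h1
      have h := hW (m + 1 + p) (by rw [hlen]; omega) hstart k hk
      obtain ⟨h1, h2⟩ := h
      rw [hlen] at h1
      rw [hget, if_neg (by omega), if_neg (by omega)] at h2
      have e : m + 1 + p + k - m - 1 = p + k := by omega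
      rw [e] at h2
      exact ⟨by omega, h2⟩
  · rintro ⟨hm, hxs⟩ r hr hs k hk
    rw [hlen] at hr
    rcases lt_trichotomy r m with h1 | h1 | h1
    · -- inside the zero block: must be r = 0, and the whole block covers the window
      have hr0 : r = 0 := by
        by_contra h0
        have hprev := hs.2.resolve_left h0
        apply hprev
        rw [hget, if_pos (by omega)]
      subst hr0
      have hLm : Lmin.toNat ≤ m := by
        by_contra h2
        exact hm ⟨by omega, (ltL m Lmin).mpr (by omega)⟩
      refine ⟨by rw [hlen]; omega, ?_⟩
      rw [hget, if_pos (by omega)]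
    · -- r = m is the nonzero cell, not a start
      exfalso
      have h2 := hs.1
      rw [hget, if_neg (by omega), if_pos h1] at h2
      exact hv h2
    · -- beyond the block: a start of xs shifted by m+1
      have hplen : r - m - 1 < xs.length := by omega
      have hsx : isStart xs (r - m - 1) := by
        refine ⟨?_, ?_⟩
        · have h2 := hs.1
          rw [hget, if_neg (by omega), if_neg (by omega)] at h2
          exact h2
        · rcases Nat.eq_zero_or_pos (r - m - 1) with h0 | h0
          · exact Or.inl h0
          · refine Or.inr ?_
            rcases hs.2 with h2 | h2
            · omega
            · rw [hget, if_neg (by omega), if_neg (by omega)] at h2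
              have e : r - 1 - m - 1 = r - m - 1 - 1 := by omega
              rw [e] at h2
              exact h2
      obtain ⟨hb, hz⟩ := hxs (r - m - 1) hplen hsx k hk
      refine ⟨by rw [hlen]; omega, ?_⟩
      rw [hget, if_neg (by omega), if_neg (by omega)]
      have e : r + k - m - 1 = r - m - 1 + k := by omega
      rw [e]
      exact hz

theorem aCheck_iff_W (col : List Int) (Lmin : Int) :
    ∀ run, (aCheck col Lmin run = true ↔ W (List.replicate run (0 : Int) ++ col) Lmin) := by
  induction col with
  | nil =>
    intro run
    simp only [aCheck, List.append_nil, W_rep_nil]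
    constructor
    · intro h
      simp at h
      omega
    · intro h
      simp
      omega
  | cons v xs ih =>
    intro run
    by_cases hv : v = 0
    · subst hv
      have hrw : List.replicate run (0 : Int) ++ 0 :: xs
          = List.replicate (run + 1) (0 : Int) ++ xs := by
        rw [List.replicate_succ', List.append_assoc]; rfl
      simp only [aCheck, hrw]
      exact ih (run + 1)
    · rw [W_rep_cons run v xs Lmin hv]
      have hx := ih 0
      simp only [List.replicate_zero, List.nil_append] at hx
      simp only [aCheck, if_neg hv]
      by_cases h : 0 < run ∧ (run : Int) < Lmin
      · simp [h]
      · simp [h, hx]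

theorem winFrom_iff (col : List Int) (n : Nat) :
    ∀ (L : Nat) (i : Nat), (winFrom col n i L = true ↔ ∀ k, k < L → i + k < n ∧ col.getD (i + k) 1 = 0) := by
  intro L
  induction L with
  | zero => intro i; simp [winFrom]
  | succ L ih =>
    intro i
    simp only [winFrom]
    split_ifs with h
    · rw [ih (i + 1)]
      constructor
      · intro hall k hk
        rcases Nat.eq_zero_or_pos k with h0 | h0
        · subst h0; simpa using h
        · have := hall (k - 1) (by omega)
          have e : i + 1 + (k - 1) = i + k := by omega
          rwa [e] at this
      · intro hall k hk
        have := hall (k + 1) (by omega)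
        have e : i + (k + 1) = i + 1 + k := by omega
        rwa [e] at this
    · simp only [false_iff]
      intro hall
      exact h (by simpa using hall 0 (by omega))

theorem alt_iff_W (g : List (List Int)) (c : Int) (Lmin : Int) :
    (col_ok_py_alt g c Lmin = true ↔ W (g.filterMap (fun row => PySem.List.pyGet? row c)) Lmin) := by
  unfold col_ok_py_alt W isStart
  simp only [List.all_eq_true, List.mem_filter, List.mem_range, Bool.and_eq_true, beq_iff_eq,
    Bool.or_eq_true, Bool.not_eq_true', beq_eq_false_iff_ne, winFrom_iff, and_imp]

theorem loopA_eq_aCheck (g : List (List Int)) (c : Int) (Lmin : Int) (run : Nat)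
    (hp : Pre_col_ok_py g c Lmin) :
    colOkLoopA g c Lmin run = aCheck (g.filterMap (fun row => PySem.List.pyGet? row c)) Lmin run := by
  induction g generalizing run with
  | nil => simp [colOkLoopA, aCheck]
  | cons row rest ih =>
    have hrow := hp row (by simp)
    have hrest : Pre_col_ok_py rest c Lmin := fun r hr => hp r (by simp [hr])
    have hsome : (PySem.List.pyGet? row c).isSome := by
      rw [Option.isSome_iff_ne_none]
      intro hn
      rw [PySem.List.pyGet?_eq_none_iff] at hn
      exact hn (by simp only [PySem.Raise.InRange]; omega)
    obtain ⟨v, hv⟩ := Option.isSome_iff_exists.mp hsome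
    simp only [colOkLoopA, List.filterMap_cons, hv, aCheck]
    by_cases h0 : v = 0
    · simp only [h0, if_true]; exact ih (run + 1) hrest
    · simp only [if_neg h0]
      by_cases h : 0 < run ∧ (run : Int) < Lmin
      · simp [h]
      · simp only [if_neg h]; exact ih 0 hrest

-- ===== VERDICT (by name: the statement is the Claim_ definition above) =====
theorem col_ok_py_spec : Claim_equal_col_ok_py := by
  intro g c Lmin _ hp
  unfold Spec_col_ok_py col_ok_py
  rw [loopA_eq_aCheck g c Lmin 0 hp]
  rw [Bool.eq_iff_iff, alt_iff_W]
  have h := aCheck_iff_W (g.filterMap (fun row => PySem.List.pyGet? row c)) Lmin 0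
  simpa using h
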